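-- pv_equiv track=rewrite | github.com/rajagrawal-10/Math-Research | coversystems.py | make_cs_list
-- ===== SOURCE A (Python) =====
-- def make_cs_list(mod_list):
--   list = []
--   l=len(mod_list)
--   if l==1:
--       list= list + [[[0,mod_list[0]]]]
--   else:
--     m = mod_list[0]
--     del mod_list[0]
--     for c in make_cs_list(mod_list):
--       for j in range(0,m):
--         d = c + [[j,m]]
--         list = list + [d]
--   return list
-- ===== SOURCE B (Python) =====
-- def make_cs_list(mod_list):
--     stash = []
--     while len(mod_list) > 1:
--         stash.append(mod_list.pop(0))
--     result = [[[0, mod_list[0]]]]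
--     for m in reversed(stash):
--         result = [c + [[j, m]] for c in result for j in range(m)]
--     return result
-- ===== Notes on version B (the rewrite author's own statement) =====
-- stated objective: alternative
-- what changed: Replaced A's recursion (strip head, recurse, append each extended combo one by one with nested list-concatenations) by an explicit two-phase iteration: pop the leading moduli into a stash, seed the result with the last modulus at residue 0, then fold the stash in reverse with a flat comprehension building each layer of the Cartesian product at once.
import Mathlib
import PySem

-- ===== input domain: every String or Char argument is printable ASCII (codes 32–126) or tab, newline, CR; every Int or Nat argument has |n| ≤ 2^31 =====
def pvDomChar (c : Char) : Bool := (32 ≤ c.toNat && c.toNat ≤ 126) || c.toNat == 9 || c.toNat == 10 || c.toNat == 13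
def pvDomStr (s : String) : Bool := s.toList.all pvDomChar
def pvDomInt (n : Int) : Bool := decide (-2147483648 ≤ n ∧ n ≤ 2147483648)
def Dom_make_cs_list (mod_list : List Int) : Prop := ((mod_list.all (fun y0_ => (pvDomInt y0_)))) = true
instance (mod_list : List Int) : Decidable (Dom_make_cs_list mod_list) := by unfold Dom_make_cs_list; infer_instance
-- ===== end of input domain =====

-- B replaces A's recursion by a two-phase iteration (pop leading moduli, then fold them in
-- reverse over a comprehension-built product); both mutate mod_list down to its last element
-- in Python — the equivalence proved here is about the RETURN value only.

-- ===== PORT A =====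
-- A: if len==1 return [[[0,m0]]], else strip the head m and, for each combo of the
-- recursive call and each j in range(0,m), append c ++ [[j,m]] to the accumulator.
def make_cs_list : List Int → List (List (List Int))
  | [] => []          -- Python raises IndexError here (mod_list[0] on empty); excluded by Pre_
  | [m0] => [] ++ [[[0, m0]]]
  | m :: r :: rest =>
      (make_cs_list (r :: rest)).foldl
        (fun acc c =>
          (PySem.List.pyRange 0 m 1).foldl (fun acc2 j => acc2 ++ [c ++ [[j, m]]]) acc)
        []

-- ===== PORT B =====
-- while len(mod_list) > 1: stash.append(mod_list.pop(0))
def altPop (stash ml : List Int) : List Int × List Int :=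
  if ml.length > 1 then altPop (stash ++ [ml.headD 0]) ml.tail
  else (stash, ml)
termination_by ml.length
decreasing_by cases ml <;> simp_all

-- result = [c + [[j, m]] for c in result for j in range(m)]
def stepB (res : List (List (List Int))) (m : Int) : List (List (List Int)) :=
  res.flatMap (fun c => (PySem.List.pyRange 0 m 1).map (fun j => c ++ [[j, m]]))

def make_cs_list_alt (mod_list : List Int) : List (List (List Int)) :=
  let p := altPop [] mod_list
  -- p.2.headD 0 transliterates mod_list[0]; p.2 is nonempty under Pre_ (Python raises on [])
  p.1.reverse.foldl stepB [[[0, p.2.headD 0]]]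

-- ===== PRECONDITION & SPEC =====
-- Pre_ excludes only the empty list, on which both Pythons raise IndexError.
def Pre_make_cs_list (mod_list : List Int) : Prop := mod_list ≠ []
instance (mod_list : List Int) : Decidable (Pre_make_cs_list mod_list) := by unfold Pre_make_cs_list; infer_instance
def pvWitness_make_cs_list : List Int := [2, 3]

def Spec_make_cs_list (mod_list : List Int) (out : List (List (List Int))) : Prop := out = make_cs_list_alt mod_list
instance (mod_list : List Int) (out : List (List (List Int))) : Decidable (Spec_make_cs_list mod_list out) := by unfold Spec_make_cs_list; infer_instance

-- ===== CLAIM (what is proved, stated in full; the proofs are below) =====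
def Claim_equal_make_cs_list : Prop := ∀ (mod_list : List Int), Dom_make_cs_list mod_list → Pre_make_cs_list mod_list → Spec_make_cs_list mod_list (make_cs_list mod_list)

-- ===== LEMMAS AND PROOFS =====

-- A's nested append-loops compute exactly one stepB layer.
theorem make_cs_list_cons (m : Int) (r : Int) (rest : List Int) :
    make_cs_list (m :: r :: rest) = stepB (make_cs_list (r :: rest)) m := by
  show (make_cs_list (r :: rest)).foldl
        (fun acc c =>
          (PySem.List.pyRange 0 m 1).foldl (fun acc2 j => acc2 ++ [c ++ [[j, m]]]) acc)
        [] = _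
  have hinner : ∀ (c : List (List Int)) (acc : List (List (List Int))),
      (PySem.List.pyRange 0 m 1).foldl (fun acc2 j => acc2 ++ [c ++ [[j, m]]]) acc
        = acc ++ (PySem.List.pyRange 0 m 1).map (fun j => c ++ [[j, m]]) := by
    intro c acc
    rw [PySem.List.foldl_append_eq_flatMap (g := fun j => [c ++ [[j, m]]])]
    congr 1
    induction PySem.List.pyRange 0 m 1 with
    | nil => rfl
    | cons a t iht => simp [List.flatMap_cons, iht]
  have houter := PySem.List.foldl_append_eq_flatMap
    (l := make_cs_list (r :: rest))
    (g := fun c => (PySem.List.pyRange 0 m 1).map (fun j => c ++ [[j, m]]))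
    (acc := ([] : List (List (List Int))))
  simp only [hinner]
  rw [houter]
  rfl

-- Invariant of the pop loop + reverse fold: folding the stash continues A's recursion.
theorem altPop_inv (ml : List Int) (stash : List Int) (h : ml ≠ []) :
    (altPop stash ml).1.reverse.foldl stepB [[[0, (altPop stash ml).2.headD 0]]]
      = stash.reverse.foldl stepB (make_cs_list ml) := by
  induction ml generalizing stash with
  | nil => exact absurd rfl h
  | cons m rest ih =>
    cases rest with
    | nil =>
      rw [altPop]
      simp [make_cs_list]
    | cons r t =>
      rw [altPop]
      have hlen : (m :: r :: t).length > 1 := by simp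
      rw [if_pos hlen]
      have := ih (stash := stash ++ [m]) (by simp)
      simp only [List.headD, List.tail] at this ⊢
      rw [this]
      rw [List.reverse_append]
      simp [List.foldl_cons, make_cs_list_cons]

-- ===== VERDICT (by name: the statement is the Claim_ definition above) =====
theorem make_cs_list_spec : Claim_equal_make_cs_list := by
  intro mod_list _ hpre
  show make_cs_list mod_list = make_cs_list_alt mod_list
  unfold make_cs_list_alt
  rw [altPop_inv mod_list [] hpre]
  rfl
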